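-- pv_equiv track=rewrite | github.com/YuehaoDai/QA-extractor | batch_qa_extraction.py | clean_for_excel
-- ===== SOURCE A (Python) =====
-- import unicodedata
--
-- def clean_for_excel(text):
--     """清理Excel中不允许的字符
--
--     Excel中不允许的字符包括:
--     - ASCII值小于32的控制字符（除了\t, \n, \r）
--     - 某些特殊Unicode字符
--     """
--     if not isinstance(text, str):
--         return text
--
--     # 保留制表符、换行符和回车符
--     allowed_control_chars = ['\t', '\n', '\r']
--
--     # 清理控制字符和特殊字符
--     cleaned_text = ''
--     for char in text:
--         # 如果是允许的控制字符，保留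
--         if char in allowed_control_chars:
--             cleaned_text += char
--             continue
--
--         # 获取字符的Unicode类别
--         category = unicodedata.category(char)
--
--         # 排除控制字符 (Cc类别)但保留允许的控制字符
--         if category == 'Cc':
--             cleaned_text += ' '  # 用空格替换控制字符
--         else:
--             # 对于其他字符，尝试保留
--             try:
--                 # 这里尝试处理可能导致Excel问题的字符
--                 # 如果是特殊字符但不是控制字符，尝试保留
--                 cleaned_text += char
--             except:
--                 # 如果还有问题，就替换为空格
--                 cleaned_text += ' '
--
--     return cleaned_text
-- ===== SOURCE B (Python) =====
-- import re
--
-- _CC_RE = re.compile(r'[\x00-\x08\x0b\x0c\x0e-\x1f\x7f-\x9f]')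
--
-- def clean_for_excel(text):
--     if not isinstance(text, str):
--         return text
--     return _CC_RE.sub(' ', text)
-- ===== Notes on version B (the rewrite author's own statement) =====
-- stated objective: faster
-- what changed: Replaced the per-character Python loop (unicodedata.category call and string concatenation per char) with a single precompiled regex substitution over the exact Cc ranges (0x00-0x08, 0x0b, 0x0c, 0x0e-0x1f, 0x7f-0x9f).
import Mathlib
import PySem

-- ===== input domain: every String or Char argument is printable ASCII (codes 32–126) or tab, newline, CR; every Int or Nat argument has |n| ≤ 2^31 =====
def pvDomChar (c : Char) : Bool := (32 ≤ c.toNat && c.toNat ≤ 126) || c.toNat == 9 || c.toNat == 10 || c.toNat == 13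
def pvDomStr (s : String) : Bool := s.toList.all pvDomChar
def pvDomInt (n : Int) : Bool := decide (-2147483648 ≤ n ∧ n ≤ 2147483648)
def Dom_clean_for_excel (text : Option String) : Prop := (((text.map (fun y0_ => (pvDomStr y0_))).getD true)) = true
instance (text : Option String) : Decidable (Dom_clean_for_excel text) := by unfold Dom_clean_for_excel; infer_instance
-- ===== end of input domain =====

-- B replaces A's per-character category-classification loop by one regex substitution over the Cc ranges (idiomatic); return values agree on all inputs.

-- ===== PORT A =====
-- unicodedata.category(c) == 'Cc' ported by hand: the Cc category is exactly
-- U+0000..U+001F and U+007F..U+009F (exact for all of Unicode).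
def pyCategoryIsCc (c : Char) : Bool := c.toNat < 32 || (127 ≤ c.toNat && c.toNat ≤ 159)

-- the loop body: allowed control chars kept, Cc replaced by ' ', everything else kept
def clean_for_excel (text : Option String) : Option String :=
  match text with
  | none => none            -- not isinstance(text, str): return text
  | some s =>
    some (String.mk (s.toList.foldl
      (fun (cleaned : List Char) (c : Char) =>
        if (c = '\t' ∨ c = '\n' ∨ c = '\r') then cleaned ++ [c]
        else if pyCategoryIsCc c then cleaned ++ [' ']
        else cleaned ++ [c]) []))

-- ===== PORT B =====
-- the regex character class [\x00-\x08\x0b\x0c\x0e-\x1f\x7f-\x9f], ported by hand (exact on this class)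
def bIsBad (c : Char) : Bool :=
  c.toNat ≤ 8 || c.toNat == 11 || c.toNat == 12 ||
  (14 ≤ c.toNat && c.toNat ≤ 31) || (127 ≤ c.toNat && c.toNat ≤ 159)

-- re.sub(pattern, ' ', text): each matched char becomes a space
def clean_for_excel_alt (text : Option String) : Option String :=
  match text with
  | none => none
  | some s => some (String.mk (s.toList.map (fun c => if bIsBad c then ' ' else c)))

-- ===== PRECONDITION & SPEC =====
def Spec_clean_for_excel (text : Option String) (out : Option String) : Prop := out = clean_for_excel_alt text
instance (text : Option String) (out : Option String) : Decidable (Spec_clean_for_excel text out) := by unfold Spec_clean_for_excel; infer_instance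

-- ===== CLAIM (what is proved, stated in full; the proofs are below) =====
def Claim_equal_clean_for_excel : Prop := ∀ (text : Option String), Dom_clean_for_excel text → Spec_clean_for_excel text (clean_for_excel text)

-- ===== LEMMAS AND PROOFS =====

theorem char_of_toNat (c : Char) (d : Char) (h : c.toNat = d.toNat) : c = d := by
  apply Char.ext
  apply UInt32.toNat_inj.mp
  simp only [Char.toNat] at h
  exact h

theorem char_step_eq (c : Char) :
    (if (c = '\t' ∨ c = '\n' ∨ c = '\r') then c
     else if pyCategoryIsCc c then ' '
     else c) = (if bIsBad c then ' ' else c) := by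
  by_cases hm : (c = '\t' ∨ c = '\n' ∨ c = '\r')
  · have : ¬ bIsBad c := by
      rcases hm with h | h | h <;> subst h <;> decide
    simp [hm, this]
  · have hne : c.toNat ≠ 9 ∧ c.toNat ≠ 10 ∧ c.toNat ≠ 13 := by
      refine ⟨?_, ?_, ?_⟩ <;> intro h <;> apply hm
      · exact Or.inl (char_of_toNat c '\t' h)
      · exact Or.inr (Or.inl (char_of_toNat c '\n' h))
      · exact Or.inr (Or.inr (char_of_toNat c '\r' h))
    simp only [hm, if_false]
    by_cases hcc : pyCategoryIsCc c
    · have : bIsBad c := by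
        unfold pyCategoryIsCc at hcc
        unfold bIsBad
        simp only [Bool.or_eq_true, Bool.and_eq_true, decide_eq_true_eq, beq_iff_eq] at *
        omega
      simp [hcc, this]
    · have : ¬ bIsBad c := by
        unfold pyCategoryIsCc at hcc
        unfold bIsBad
        simp only [Bool.or_eq_true, Bool.and_eq_true, decide_eq_true_eq, beq_iff_eq] at *
        omega
      simp [hcc, this]

theorem step_eq (acc : List Char) (c : Char) :
    (if (c = '\t' ∨ c = '\n' ∨ c = '\r') then acc ++ [c]
     else if pyCategoryIsCc c then acc ++ [' ']
     else acc ++ [c]) = acc ++ [if bIsBad c then ' ' else c] := by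
  have h : (if (c = '\t' ∨ c = '\n' ∨ c = '\r') then acc ++ [c]
      else if pyCategoryIsCc c then acc ++ [' '] else acc ++ [c])
      = acc ++ [if (c = '\t' ∨ c = '\n' ∨ c = '\r') then c
        else if pyCategoryIsCc c then ' ' else c] := by
    split_ifs <;> rfl
  rw [h, char_step_eq]

theorem foldl_eq_map (l : List Char) (acc : List Char) :
    l.foldl (fun (cleaned : List Char) (c : Char) =>
        if (c = '\t' ∨ c = '\n' ∨ c = '\r') then cleaned ++ [c]
        else if pyCategoryIsCc c then cleaned ++ [' ']
        else cleaned ++ [c]) acc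
      = acc ++ l.map (fun c => if bIsBad c then ' ' else c) := by
  induction l generalizing acc with
  | nil => simp
  | cons c l ih =>
    simp only [List.foldl_cons, List.map_cons]
    rw [step_eq, ih, List.append_assoc]
    rfl

-- ===== VERDICT (by name: the statement is the Claim_ definition above) =====
theorem clean_for_excel_spec : Claim_equal_clean_for_excel := by
  intro text _
  unfold Spec_clean_for_excel clean_for_excel clean_for_excel_alt
  cases text with
  | none => rfl
  | some s => simp [foldl_eq_map]
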